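-- pv_equiv track=rewrite | github.com/k3sero/Blog_Content | Competiciones_Internacionales_Writeups/2025/SecconCTF2025/Cripto/yukari/solver.py | v2_order
-- ===== SOURCE A (Python) =====
-- def v2(n: int) -> int:
--     c = 0
--     while n & 1 == 0:
--         n >>= 1
--         c += 1
--     return c
--
-- def v2_order(a: int, p: int) -> int:
--     s = v2(p - 1)
--     m = (p - 1) >> s
--     x = pow(a % p, m, p)
--     if x == 1:
--         return 0
--     j = 0
--     while x != 1:
--         x = pow(x, 2, p)
--         j += 1
--         if j > s:
--             raise RuntimeError("unexpected v2_order overflow")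
--     return j
-- ===== SOURCE B (Python) =====
-- def v2_order(a: int, p: int) -> int:
--     n = p - 1
--     s = 0
--     while n % 2 == 0:
--         n //= 2
--         s += 1
--     for k in range(s, -1, -1):
--         if pow(a, (p - 1) >> k, p) == 1:
--             return s - k
--     raise RuntimeError("unexpected v2_order overflow")
-- ===== Notes on version B (the rewrite author's own statement) =====
-- stated objective: alternative
-- what changed: Instead of computing x = a^((p-1)/2^s) once and repeatedly squaring it mod p until it reaches 1, B scans k = s..0 and returns s-k at the first full modular exponentiation pow(a,(p-1)>>k,p) that equals 1.
import Mathlib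
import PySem

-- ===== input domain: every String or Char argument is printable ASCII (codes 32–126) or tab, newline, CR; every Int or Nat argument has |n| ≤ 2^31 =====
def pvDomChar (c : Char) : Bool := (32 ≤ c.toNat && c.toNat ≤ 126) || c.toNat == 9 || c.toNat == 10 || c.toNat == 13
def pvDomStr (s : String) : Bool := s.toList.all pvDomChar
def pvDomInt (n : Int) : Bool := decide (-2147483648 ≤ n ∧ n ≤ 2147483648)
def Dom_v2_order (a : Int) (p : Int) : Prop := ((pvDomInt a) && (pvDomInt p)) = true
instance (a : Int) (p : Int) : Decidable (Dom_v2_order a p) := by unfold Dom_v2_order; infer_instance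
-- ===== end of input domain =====

-- B replaces A's repeated-squaring ascent from a^((p-1)/2^s) by a descending scan over
-- full modular exponentiations a^((p-1)>>k), k = s..0, returning s-k at the first hit
-- (objective: alternative algorithm, same results; not claimed faster).

-- shared port of Python's built-in three-argument pow(b, e, m): binary exponentiation,
-- reducing mod m at each step (exact for m > 0, the only case the claim reaches)
def pmodAux (b : Int) (m : Int) : Nat → Nat → Int
  | _, 0 => 1 % m
  | 0, _ + 1 => 0
  | f + 1, e + 1 =>
    let h := pmodAux b m f ((e + 1) / 2)
    if (e + 1) % 2 = 0 then h * h % m else h * h % m * (b % m) % m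

def pmod (b : Int) (e : Nat) (m : Int) : Int := pmodAux b m e e

-- ===== PORT A =====
-- A's helper v2: count trailing zero bits by halving (n = 0 guard totalizes; Python diverges there).
def v2A (n : Nat) : Nat :=
  if n = 0 then 0
  else if n % 2 = 0 then v2A (n / 2) + 1
  else 0
decreasing_by exact Nat.div_lt_self (Nat.pos_of_ne_zero (by assumption)) (by omega)

-- A's squaring loop: `while x != 1: x = pow(x,2,p); j += 1; if j > s: raise`
-- (the raise branch returns 0 here; Pre_ excludes those inputs).
def loopA (p : Int) (s : Nat) (x : Int) (j : Nat) : Int :=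
  if x = 1 then (j : Int)
  else if j + 1 > s then 0
  else loopA p s (pmod x 2 p) (j + 1)
termination_by s + 1 - j

def v2_order (a : Int) (p : Int) : Int :=
  let s := v2A (p - 1).toNat
  let m := (p - 1).toNat >>> s
  let x := pmod (a % p) m p
  loopA p s x 0

-- ===== PORT B =====
-- B's trailing-zero count, accumulator style (`while n % 2 == 0: n //= 2; s += 1`).
def v2B (n : Nat) (s : Nat) : Nat :=
  if n ≠ 0 ∧ n % 2 = 0 then v2B (n / 2) (s + 1) else s
decreasing_by exact Nat.div_lt_self (Nat.pos_of_ne_zero (by omega)) (by omega)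

-- B's descending scan: `for k in range(s, -1, -1): if pow(a,(p-1)>>k,p)==1: return s-k`
-- (falling off the loop raises in Python; returns 0 here, excluded by Pre_).
def searchB (a : Int) (p : Int) (s : Nat) (k : Nat) : Int :=
  if pmod a ((p - 1).toNat >>> k) p = 1 then ((s - k : Nat) : Int)
  else
    match k with
    | 0 => 0
    | k' + 1 => searchB a p s k'

def v2_order_alt (a : Int) (p : Int) : Int :=
  let s := v2B (p - 1).toNat 0
  searchB a p s s

-- ===== PRECONDITION & SPEC =====
-- Exactly the inputs on which A returns: p ≥ 2 (p = 1 diverges in v2, p ≤ 0 raises in pow)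
-- and a^(p-1) ≡ 1 (mod p) (otherwise A's loop overruns s and raises RuntimeError).
-- The congruence is written with pmod (= Python's pow(a, p-1, p); lemma pmod_eq below
-- proves pmod a e p = a ^ e % p) only because the literal power a^(p-1) is astronomically
-- large for p near 2^31; the condition itself is the closed form a^(p-1) % p = 1.
def Pre_v2_order (a : Int) (p : Int) : Prop := 2 ≤ p ∧ pmod a (p - 1).toNat p = 1
instance (a : Int) (p : Int) : Decidable (Pre_v2_order a p) := by unfold Pre_v2_order; infer_instance

def pvWitness_v2_order : Int × Int := (2, 5)

def Spec_v2_order (a : Int) (p : Int) (out : Int) : Prop := out = v2_order_alt a p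
instance (a : Int) (p : Int) (out : Int) : Decidable (Spec_v2_order a p out) := by unfold Spec_v2_order; infer_instance

-- ===== CLAIM (what is proved, stated in full; the proofs are below) =====
def Claim_equal_v2_order : Prop := ∀ (a : Int) (p : Int), Dom_v2_order a p → Pre_v2_order a p → Spec_v2_order a p (v2_order a p)

-- ===== LEMMAS AND PROOFS =====

theorem powm_emod (a : Int) (n : Nat) (p : Int) : (a % p) ^ n % p = a ^ n % p := by
  induction n with
  | zero => simp
  | succ k ih =>
    calc (a % p) ^ (k + 1) % p = ((a % p) ^ k % p * (a % p % p)) % p := by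
          rw [pow_succ, Int.mul_emod]
      _ = (a ^ k % p * (a % p)) % p := by rw [ih, Int.emod_emod_of_dvd a dvd_rfl]
      _ = (a ^ k * a) % p := by rw [← Int.mul_emod]
      _ = a ^ (k + 1) % p := by rw [pow_succ]

theorem pmodAux_eq (b m : Int) : ∀ (f e : Nat), e ≤ f → pmodAux b m f e = b ^ e % m := by
  intro f
  induction f with
  | zero =>
    intro e he
    have : e = 0 := by omega
    subst this
    simp [pmodAux]
  | succ f ih =>
    intro e he
    match e with
    | 0 => simp [pmodAux]
    | e' + 1 =>
      rw [pmodAux]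
      have hsq : pmodAux b m f ((e' + 1) / 2) * pmodAux b m f ((e' + 1) / 2) % m
          = b ^ ((e' + 1) / 2 + (e' + 1) / 2) % m := by
        rw [ih ((e' + 1) / 2) (by omega), ← Int.mul_emod, ← pow_add]
      by_cases h2 : (e' + 1) % 2 = 0
      · simp only [h2, if_true]
        rw [hsq]
        have hee : (e' + 1) / 2 + (e' + 1) / 2 = e' + 1 := by omega
        rw [hee]
      · simp only [h2, if_false]
        rw [hsq, ← Int.mul_emod, ← pow_succ]
        have hee : (e' + 1) / 2 + (e' + 1) / 2 + 1 = e' + 1 := by omega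
        rw [hee]

theorem pmod_eq (b : Int) (e : Nat) (m : Int) : pmod b e m = b ^ e % m :=
  pmodAux_eq b m e e (le_refl e)

theorem v2B_eq (n s : Nat) : v2B n s = v2A n + s := by
  induction n using v2A.induct generalizing s with
  | case1 => rw [v2B, v2A]; simp
  | case2 n hn h ih =>
    rw [v2B, if_pos ⟨hn, h⟩, v2A, if_neg hn, if_pos h, ih]; omega
  | case3 n hn h =>
    rw [v2B, if_neg (fun hc => h hc.2), v2A, if_neg hn, if_neg h]; omega

theorem v2A_dvd (n : Nat) : 2 ^ v2A n ∣ n := by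
  induction n using v2A.induct with
  | case1 => simp [v2A]
  | case2 n hn h ih =>
    rw [v2A, if_neg hn, if_pos h, pow_succ]
    obtain ⟨c, hc⟩ := ih
    set v := v2A (n / 2) with hv
    refine ⟨c, ?_⟩
    calc n = 2 * (n / 2) := by omega
      _ = 2 * (2 ^ v * c) := by rw [hc]
      _ = 2 ^ v * 2 * c := by ring
  | case3 n hn h => rw [v2A, if_neg hn, if_neg h]; simp

-- exact division: with 2^s ∣ n, (n >>> s) * 2^(s-k) = n >>> k for k ≤ s
theorem shift_eq (n s k : Nat) (hd : 2 ^ s ∣ n) (hk : k ≤ s) :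
    (n >>> s) * 2 ^ (s - k) = n >>> k := by
  obtain ⟨c, hc⟩ := hd
  subst hc
  simp only [Nat.shiftRight_eq_div_pow]
  rw [Nat.mul_div_cancel_left c (Nat.two_pow_pos s)]
  have h2 : (2:Nat) ^ s = 2 ^ k * 2 ^ (s - k) := by rw [← pow_add]; congr 1; omega
  rw [h2, mul_assoc, Nat.mul_div_cancel_left _ (Nat.two_pow_pos k)]
  exact Nat.mul_comm _ _

-- the value of A's squaring chain at step j
def chain (a p : Int) (m j : Nat) : Int := a ^ (m * 2 ^ j) % p

theorem chain_succ (a p : Int) (m j : Nat) :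
    pmod (chain a p m j) 2 p = chain a p m (j + 1) := by
  unfold chain
  rw [pmod_eq, powm_emod, ← pow_mul, pow_succ, mul_assoc]

theorem loopA_eq_find (a p : Int) (m s : Nat)
    (hex : ∃ j, chain a p m j = 1) (hs : Nat.find hex ≤ s) :
    ∀ j, j ≤ Nat.find hex → loopA p s (chain a p m j) j = (Nat.find hex : Int) := by
  intro j hj
  induction hh : Nat.find hex - j generalizing j with
  | zero =>
    have hje : j = Nat.find hex := by omega
    rw [loopA, if_pos (by rw [hje]; exact Nat.find_spec hex), hje]
  | succ t ih =>
    have hne : chain a p m j ≠ 1 := fun h => by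
      have := Nat.find_min' hex h; omega
    rw [loopA, if_neg hne, if_neg (by omega), chain_succ]
    exact ih (j + 1) (by omega) (by omega)

theorem searchB_eq_find (a p : Int) (s : Nat) (hd : 2 ^ s ∣ (p - 1).toNat)
    (hex : ∃ j, chain a p ((p - 1).toNat >>> s) j = 1) (hfind : Nat.find hex ≤ s) :
    ∀ k, k ≤ s → s - k ≤ Nat.find hex → searchB a p s k = (Nat.find hex : Int) := by
  intro k
  induction k with
  | zero =>
    intro _ h0
    have hfs : Nat.find hex = s := by omega
    have hc : a ^ ((p - 1).toNat >>> 0) % p = 1 := by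
      have hsp := Nat.find_spec hex
      rw [hfs] at hsp
      unfold chain at hsp
      have he : ((p - 1).toNat >>> s) * 2 ^ s = (p - 1).toNat >>> 0 := by
        simpa using shift_eq (p - 1).toNat s 0 hd (Nat.zero_le _)
      rwa [he] at hsp
    rw [searchB, pmod_eq, if_pos hc, hfs]
    simp
  | succ k' ih =>
    intro hk hlow
    have hsk : ((p - 1).toNat >>> s) * 2 ^ (s - (k' + 1)) = (p - 1).toNat >>> (k' + 1) :=
      shift_eq _ s (k' + 1) hd hk
    by_cases hc : a ^ ((p - 1).toNat >>> (k' + 1)) % p = 1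
    · have hch : chain a p ((p - 1).toNat >>> s) (s - (k' + 1)) = 1 := by
        unfold chain; rw [hsk]; exact hc
      have h1 := Nat.find_min' hex hch
      rw [searchB, pmod_eq, if_pos hc]
      have heq : s - (k' + 1) = Nat.find hex := by omega
      rw [heq]
    · have hch : chain a p ((p - 1).toNat >>> s) (s - (k' + 1)) ≠ 1 := by
        unfold chain; rw [hsk]; exact hc
      have hne : Nat.find hex ≠ s - (k' + 1) := fun h => hch (h ▸ Nat.find_spec hex)
      rw [searchB, pmod_eq, if_neg hc]
      exact ih (by omega) (by omega)

-- ===== VERDICT (by name: the statement is the Claim_ definition above) =====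
theorem v2_order_spec : Claim_equal_v2_order := by
  intro a p _ hpre
  obtain ⟨hp2, hpow⟩ := hpre
  rw [pmod_eq] at hpow
  unfold Spec_v2_order
  have hms : ((p - 1).toNat >>> v2A (p - 1).toNat) * 2 ^ v2A (p - 1).toNat = (p - 1).toNat := by
    simpa using shift_eq (p - 1).toNat (v2A (p - 1).toNat) 0 (v2A_dvd _) (Nat.zero_le _)
  have hcs : chain a p ((p - 1).toNat >>> v2A (p - 1).toNat) (v2A (p - 1).toNat) = 1 := by
    unfold chain; rw [hms]; exact hpow
  have hex : ∃ j, chain a p ((p - 1).toNat >>> v2A (p - 1).toNat) j = 1 := ⟨_, hcs⟩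
  have hfind : Nat.find hex ≤ v2A (p - 1).toNat := Nat.find_min' hex hcs
  have hA : v2_order a p = (Nat.find hex : Int) := by
    show loopA p (v2A (p - 1).toNat)
        (pmod (a % p) ((p - 1).toNat >>> v2A (p - 1).toNat) p) 0 = _
    have hc0 : pmod (a % p) ((p - 1).toNat >>> v2A (p - 1).toNat) p
        = chain a p ((p - 1).toNat >>> v2A (p - 1).toNat) 0 := by
      unfold chain; rw [pmod_eq, powm_emod]; norm_num
    rw [hc0]
    exact loopA_eq_find a p _ _ hex hfind 0 (Nat.zero_le _)
  have hB : v2_order_alt a p = (Nat.find hex : Int) := by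
    show searchB a p (v2B (p - 1).toNat 0) (v2B (p - 1).toNat 0) = _
    rw [v2B_eq, Nat.add_zero]
    exact searchB_eq_find a p (v2A (p - 1).toNat) (v2A_dvd _) hex hfind _ le_rfl (by omega)
  rw [hA, hB]
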